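-- pv_equiv track=rewrite | github.com/BrianMills2718/qc | archive/old_system/qc/validation/research_validator.py | _calculate_agreement_matrix
-- ===== SOURCE A (Python) =====
-- from typing import Dict, List, Any, Optional, Tuple, Set
--
-- def _calculate_agreement_matrix(coder_assignments: Dict, all_quotes: Set, all_codes: Set) -> Dict:
--     """Calculate agreement matrix for all coder pairs"""
--
--     agreement_data = {}
--
--     for quote_id in all_quotes:
--         quote_agreements = {}
--
--         for code in all_codes:
--             coder_decisions = []
--
--             for session_id, assignments in coder_assignments.items():
--                 # 1 if coder assigned this code to this quote, 0 otherwise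
--                 assigned = 1 if quote_id in assignments and code in assignments[quote_id] else 0
--                 coder_decisions.append(assigned)
--
--             quote_agreements[code] = coder_decisions
--
--         agreement_data[quote_id] = quote_agreements
--
--     return agreement_data
-- ===== SOURCE B (Python) =====
-- def _calculate_agreement_matrix(coder_assignments, all_quotes, all_codes):
--     """Build the dense zero matrix first, then fill it in one scatter pass over the coders."""
--     n = len(coder_assignments)
--     agreement_data = {q: {c: [0] * n for c in all_codes} for q in all_quotes}
--     for i, (session_id, assignments) in enumerate(coder_assignments.items()):
--         for quote_id, codes in assignments.items():
--             if quote_id in agreement_data: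
--                 row = agreement_data[quote_id]
--                 for code in codes:
--                     if code in row:
--                         row[code][i] = 1
--     return agreement_data
-- ===== Notes on version B (the rewrite author's own statement) =====
-- stated objective: alternative
-- what changed: Instead of computing each quote x code x coder cell by membership tests inside a triple loop, B allocates the dense zero table once and then does a single sparse scatter pass over the coders' assignments, writing 1s at the enumerated coder index.
import Mathlib
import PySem

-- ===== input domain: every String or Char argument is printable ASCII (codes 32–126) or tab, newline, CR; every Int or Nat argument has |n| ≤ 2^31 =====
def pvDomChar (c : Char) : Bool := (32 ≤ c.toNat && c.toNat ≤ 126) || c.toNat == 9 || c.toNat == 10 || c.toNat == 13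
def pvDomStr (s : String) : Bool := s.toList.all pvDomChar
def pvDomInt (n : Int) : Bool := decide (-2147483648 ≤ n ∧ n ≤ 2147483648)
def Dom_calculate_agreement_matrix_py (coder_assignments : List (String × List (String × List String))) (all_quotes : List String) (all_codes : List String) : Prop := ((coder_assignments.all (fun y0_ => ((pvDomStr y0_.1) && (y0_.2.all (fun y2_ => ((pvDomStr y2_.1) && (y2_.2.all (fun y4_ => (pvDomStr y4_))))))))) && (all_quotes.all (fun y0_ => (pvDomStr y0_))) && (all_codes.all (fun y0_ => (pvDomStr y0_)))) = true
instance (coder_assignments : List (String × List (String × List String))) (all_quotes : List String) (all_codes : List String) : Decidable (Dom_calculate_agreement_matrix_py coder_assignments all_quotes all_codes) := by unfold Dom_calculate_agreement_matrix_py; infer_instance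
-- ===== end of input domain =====

-- B builds the dense zero table once and fills it with a single scatter pass over the coders
-- (a different traversal of the same data); this file proves the two ports return equal values.

-- ===== PORT A =====
-- Literal transliteration of A's triple loop: dicts built by insert, decision rows built by append.
def calculate_agreement_matrix_py (coder_assignments : List (String × List (String × List String))) (all_quotes : List String) (all_codes : List String) : List (String × List (String × List Int)) :=
  (all_quotes.foldl (fun agreement_data quote_id =>
      agreement_data.insert quote_id
        ((all_codes.foldl (fun quote_agreements code =>
            quote_agreements.insert code
              (coder_assignments.foldl (fun coder_decisions p =>
                  coder_decisions ++
                    [if (PySem.Dict.mk p.2).contains quote_id &&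
                        ((PySem.Dict.mk p.2).getD quote_id []).contains code then (1 : Int) else 0])
                []))
          (PySem.Dict.empty : PySem.Dict String (List Int))).items))
    (PySem.Dict.empty : PySem.Dict String (List (String × List Int)))).items

-- ===== PORT B =====
-- Literal transliteration of Source B: dense zero table, then one scatter pass over enumerate(coder_assignments).
def calculate_agreement_matrix_py_alt(coder_assignments : List (String × List (String × List String))) (all_quotes : List String) (all_codes : List String) : List (String × List (String × List Int)) :=
  let n := coder_assignments.length
  let agreement_data : PySem.Dict String (PySem.Dict String (List Int)) :=
    all_quotes.foldl (fun ad q =>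
        ad.insert q (all_codes.foldl (fun r c => r.insert c (List.replicate n (0 : Int))) PySem.Dict.empty))
      PySem.Dict.empty
  let filled := (PySem.List.enumerate coder_assignments).foldl (fun tbl ip =>
      ip.2.2.foldl (fun tbl qc =>
          if tbl.contains qc.1 then
            tbl.modify qc.1 PySem.Dict.empty (fun row =>
              qc.2.foldl (fun row code =>
                  if row.contains code then row.modify code [] (fun cell => cell.set ip.1.toNat 1) else row)
                row)
          else tbl)
        tbl)
    agreement_data
  filled.items.map (fun p => (p.1, p.2.items))

-- ===== PRECONDITION & SPEC =====
-- Pre_ excludes only Lean-side argument lists that are not valid encodings of the Python arguments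
-- (all_quotes/all_codes encode Python sets, so their elements are distinct; each coder's inner dict has
-- unique keys); every input expressible in Python satisfies it.
def Pre_calculate_agreement_matrix_py (coder_assignments : List (String × List (String × List String))) (all_quotes : List String) (all_codes : List String) : Prop :=
  all_quotes.Nodup ∧ all_codes.Nodup ∧ ∀ p ∈ coder_assignments, (p.2.map Prod.fst).Nodup
instance (coder_assignments : List (String × List (String × List String))) (all_quotes : List String) (all_codes : List String) : Decidable (Pre_calculate_agreement_matrix_py coder_assignments all_quotes all_codes) := by unfold Pre_calculate_agreement_matrix_py; infer_instance

def pvWitness_calculate_agreement_matrix_py : (List (String × List (String × List String))) × List String × List String :=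
  ([("s1", [("q1", ["c1"])]), ("s2", [])], ["q1", "q2"], ["c1", "c2"])

def Spec_calculate_agreement_matrix_py (coder_assignments : List (String × List (String × List String))) (all_quotes : List String) (all_codes : List String) (out : List (String × List (String × List Int))) : Prop := out = calculate_agreement_matrix_py_alt coder_assignments all_quotes all_codes
instance (coder_assignments : List (String × List (String × List String))) (all_quotes : List String) (all_codes : List String) (out : List (String × List (String × List Int))) : Decidable (Spec_calculate_agreement_matrix_py coder_assignments all_quotes all_codes out) := by unfold Spec_calculate_agreement_matrix_py; infer_instance

-- ===== CLAIM (what is proved, stated in full; the proofs are below) =====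
def Claim_equal_calculate_agreement_matrix_py : Prop := ∀ (coder_assignments : List (String × List (String × List String))) (all_quotes : List String) (all_codes : List String), Dom_calculate_agreement_matrix_py coder_assignments all_quotes all_codes → Pre_calculate_agreement_matrix_py coder_assignments all_quotes all_codes → Spec_calculate_agreement_matrix_py coder_assignments all_quotes all_codes (calculate_agreement_matrix_py coder_assignments all_quotes all_codes)

-- ===== LEMMAS AND PROOFS =====

def tabD {ν : Type} (ks : List String) (h : String → ν) : PySem.Dict String ν :=
  PySem.Dict.mk (ks.map (fun k => (k, h k)))

def hitB (asg : List (String × List String)) (q c : String) : Bool :=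
  asg.any (fun qc => qc.1 == q && qc.2.contains c)

theorem foldl_insert_tabD {ν : Type} (ks : List String) (v : String → ν) (hks : ks.Nodup) :
    ks.foldl (fun d k => d.insert k (v k)) PySem.Dict.empty = tabD ks v := by
  apply PySem.Dict.ext
  have h := PySem.Dict.items_foldl_insert_fresh (l := ks) (k := fun x => x) (v := v)
    (d := PySem.Dict.empty)
    (by intro a _; simp [PySem.Dict.contains, PySem.Dict.empty])
    (by simpa using hks)
  simpa [tabD, PySem.Dict.empty] using h

theorem any_beq_eq_decide_mem (ks : List String) (x : String) :
    (ks.any fun k => k == x) = decide (x ∈ ks) := by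
  induction ks with
  | nil => rfl
  | cons k r ih => rw [List.any_cons, ih]; simp [Bool.beq_eq_decide_eq, eq_comm]

theorem contains_tabD {ν : Type} (ks : List String) (h : String → ν) (x : String) :
    (tabD ks h).contains x = decide (x ∈ ks) := by
  simp only [tabD, PySem.Dict.contains, List.any_map]
  exact any_beq_eq_decide_mem ks x

theorem getD_tabD {ν : Type} (ks : List String) (h : String → ν) (x : String) (d : ν)
    (hx : x ∈ ks) : (tabD ks h).getD x d = h x := by
  induction ks with
  | nil => cases hx
  | cons k rest ih =>
    by_cases hk : k = x
    · subst hk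
      simp [tabD, PySem.Dict.getD, PySem.Dict.get?]
    · have hx' : x ∈ rest := by
        rcases List.mem_cons.mp hx with h' | h'
        · exact absurd h'.symm hk
        · exact h'
      have hne : (k == x) = false := by simp [Bool.beq_eq_decide_eq, hk]
      have := ih hx'
      simpa [tabD, PySem.Dict.getD, PySem.Dict.get?, hne] using this

theorem modify_tabD {ν : Type} (ks : List String) (h : String → ν) (x : String) (d : ν)
    (f : ν → ν) (hx : x ∈ ks) :
    (tabD ks h).modify x d f = tabD ks (fun k => if k = x then f (h k) else h k) := by
  unfold PySem.Dict.modify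
  rw [getD_tabD ks h x d hx]
  have hc : (tabD ks h).contains x = true := by
    rw [contains_tabD]; simpa using hx
  unfold PySem.Dict.insert
  rw [hc]
  simp only [if_pos]
  unfold tabD
  congr 1
  rw [List.map_map]
  refine List.map_congr_left (fun k _ => ?_)
  by_cases hk : k = x
  · subst hk; simp
  · have hne : (k == x) = false := by simp [Bool.beq_eq_decide_eq, hk]
    simp [hk]

theorem hitB_cons (p : String × List String) (rest : List (String × List String)) (q c : String) :
    hitB (p :: rest) q c = (decide (q = p.1 ∧ c ∈ p.2) || hitB rest q c) := by
  simp only [hitB, List.any_cons, Bool.beq_eq_decide_eq, Bool.decide_and]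
  congr 1
  simp [eq_comm]

theorem tabD_congr {ν : Type} {ks : List String} {h h' : String → ν}
    (H : ∀ k ∈ ks, h k = h' k) : tabD ks h = tabD ks h' := by
  unfold tabD
  congr 1
  exact List.map_congr_left (fun k hk => by rw [H k hk])

theorem rowFold (codes cs : List String) (h : String → List Int) (i : Nat) :
    codes.foldl (fun row code =>
        if row.contains code then row.modify code [] (fun cell => cell.set i 1) else row)
      (tabD cs h)
    = tabD cs (fun c => if codes.contains c then (h c).set i 1 else h c) := by
  induction codes generalizing h with
  | nil => exact tabD_congr (fun k _ => by simp)
  | cons c0 rest ih =>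
    simp only [List.foldl_cons]
    rw [contains_tabD]
    by_cases hc0 : c0 ∈ cs
    · rw [if_pos (by simpa using hc0)]
      rw [modify_tabD cs h c0 [] _ hc0, ih]
      refine tabD_congr (fun c _ => ?_)
      by_cases hcc : c = c0
      · subst hcc
        by_cases hr : c ∈ rest
        · simp [hr, List.set_set]
        · simp [hr]
      · by_cases hr : c ∈ rest <;>
          simp [hr, hcc]
    · rw [if_neg (by simpa using hc0)]
      rw [ih]
      refine tabD_congr (fun c hcs => ?_)
      have hne : ¬ c = c0 := fun h' => hc0 (h' ▸ hcs)
      by_cases hr : c ∈ rest <;> simp [hr, hne]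

theorem Tab_congr {qs cs : List String} {g g' : String → String → List Int}
    (H : ∀ q ∈ qs, ∀ c ∈ cs, g q c = g' q c) :
    tabD qs (fun q => tabD cs (g q)) = tabD qs (fun q => tabD cs (g' q)) :=
  tabD_congr (fun q hq => tabD_congr (fun c hc => H q hq c hc))

theorem coderFold (asg : List (String × List String)) (qs cs : List String)
    (g : String → String → List Int) (i : Nat) :
    asg.foldl (fun tbl qc =>
        if tbl.contains qc.1 then
          tbl.modify qc.1 PySem.Dict.empty (fun row =>
            qc.2.foldl (fun row code =>
                if row.contains code then row.modify code [] (fun cell => cell.set i 1) else row)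
              row)
        else tbl)
      (tabD qs (fun q => tabD cs (g q)))
    = tabD qs (fun q => tabD cs (fun c => if hitB asg q c then (g q c).set i 1 else g q c)) := by
  induction asg generalizing g with
  | nil => exact Tab_congr (fun q _ c _ => by simp [hitB])
  | cons p rest ih =>
    simp only [List.foldl_cons]
    rw [contains_tabD]
    by_cases hq0 : p.1 ∈ qs
    · rw [if_pos (by simpa using hq0)]
      rw [modify_tabD qs _ p.1 _ _ hq0]
      have hshape : tabD qs (fun q => if q = p.1 then
            p.2.foldl (fun row code =>
                if row.contains code then row.modify code [] (fun cell => cell.set i 1) else row)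
              (tabD cs (g q))
          else tabD cs (g q))
          = tabD qs (fun q => tabD cs ((fun q c => if q = p.1 ∧ c ∈ p.2 then (g q c).set i 1 else g q c) q)) := by
        refine tabD_congr (fun q _ => ?_)
        by_cases hqq : q = p.1
        · simp only [if_pos hqq]
          rw [rowFold]
          exact tabD_congr (fun c _ => by
            by_cases h : c ∈ p.2 <;> simp [h, hqq])
        · simp only [if_neg hqq]
          exact tabD_congr (fun c _ => by simp [hqq])
      rw [hshape, ih]
      refine Tab_congr (fun q _ c _ => ?_)
      rw [hitB_cons]
      by_cases h2 : q = p.1 ∧ c ∈ p.2 <;> by_cases h1 : hitB rest q c <;>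
        simp [h1, h2, List.set_set]
    · rw [if_neg (by simpa using hq0)]
      rw [ih]
      refine Tab_congr (fun q hqs c _ => ?_)
      rw [hitB_cons]
      have hne : ¬(q = p.1 ∧ c ∈ p.2) := fun h => hq0 (h.1 ▸ hqs)
      simp [hne]

def fillCell (l : List (String × List (String × List String))) (s : Nat) (q c : String) (r : List Int) : List Int :=
  match l with
  | [] => r
  | p :: rest => fillCell rest (s + 1) q c (if hitB p.2 q c then r.set s 1 else r)

theorem scatterFold (l : List (String × List (String × List String))) (s : Nat)
    (qs cs : List String) (g : String → String → List Int) :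
    (PySem.List.enumerate l (s : Int)).foldl (fun tbl ip =>
        ip.2.2.foldl (fun tbl qc =>
            if tbl.contains qc.1 then
              tbl.modify qc.1 PySem.Dict.empty (fun row =>
                qc.2.foldl (fun row code =>
                    if row.contains code then row.modify code [] (fun cell => cell.set ip.1.toNat 1) else row)
                  row)
            else tbl)
          tbl)
      (tabD qs (fun q => tabD cs (g q)))
    = tabD qs (fun q => tabD cs (fun c => fillCell l s q c (g q c))) := by
  induction l generalizing s g with
  | nil => simp [PySem.List.enumerate, fillCell]
  | cons p rest ih =>
    rw [PySem.List.enumerate_cons, List.foldl_cons]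
    rw [coderFold p.2 qs cs g (s : Int).toNat]
    have hs : ((s : Int)).toNat = s := Int.toNat_natCast s
    have hs1 : (s : Int) + 1 = ((s + 1 : Nat) : Int) := by push_cast; ring
    rw [hs, hs1, ih]
    exact Tab_congr (fun q _ c _ => by simp [fillCell])

theorem fillCell_closed (l : List (String × List (String × List String))) (q c : String)
    (pre : List Int) :
    fillCell l pre.length q c (pre ++ List.replicate l.length 0)
    = pre ++ l.map (fun p => if hitB p.2 q c then (1 : Int) else 0) := by
  induction l generalizing pre with
  | nil => simp [fillCell]
  | cons p rest ih =>
    have hset : ∀ v : Int, ((0 : Int) :: List.replicate rest.length 0).set 0 v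
        = v :: List.replicate rest.length 0 := by intro v; rfl
    have hset2 : ∀ v : Int, (pre ++ (0 : Int) :: List.replicate rest.length 0).set pre.length v
        = (pre ++ [v]) ++ List.replicate rest.length 0 := by
      intro v
      rw [List.set_append_right _ _ (le_refl pre.length)]
      simp
    by_cases hh : hitB p.2 q c
    · have step : fillCell (p :: rest) pre.length q c (pre ++ List.replicate (p :: rest).length 0)
          = fillCell rest (pre.length + 1) q c ((pre ++ [(1 : Int)]) ++ List.replicate rest.length 0) := by
        simp only [fillCell, hh, if_pos, List.length_cons, List.replicate_succ, hset2]
      rw [step]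
      have h2 := ih (pre ++ [(1 : Int)])
      simp only [List.length_append, List.length_cons, List.length_nil] at h2
      rw [h2]
      simp [hh]
    · have step : fillCell (p :: rest) pre.length q c (pre ++ List.replicate (p :: rest).length 0)
          = fillCell rest (pre.length + 1) q c ((pre ++ [(0 : Int)]) ++ List.replicate rest.length 0) := by
        simp only [fillCell, hh, List.length_cons, List.replicate_succ]
        congr 1
        simp
      rw [step]
      have h2 := ih (pre ++ [(0 : Int)])
      simp only [List.length_append, List.length_cons, List.length_nil] at h2
      rw [h2]
      simp [hh]

theorem cell_eq_hit (asg : List (String × List String)) (q c : String)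
    (hnd : (asg.map Prod.fst).Nodup) :
    ((PySem.Dict.mk asg).contains q && ((PySem.Dict.mk asg).getD q []).contains c) = hitB asg q c := by
  induction asg with
  | nil => simp [PySem.Dict.contains, PySem.Dict.getD, PySem.Dict.get?, hitB]
  | cons p rest ih =>
    simp only [List.map_cons, List.nodup_cons] at hnd
    rw [hitB_cons]
    by_cases hk : p.1 = q
    · have hrest : hitB rest q c = false := by
        rw [hitB, List.any_eq_false]
        intro qc hqc
        have hne : ¬ qc.1 = q := fun h =>
          hnd.1 (hk ▸ h ▸ (List.mem_map.mpr ⟨qc, hqc, rfl⟩))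
        simp [Bool.beq_eq_decide_eq, hne]
      have hbq : (p.1 == q) = true := by simp [hk]
      simp [PySem.Dict.contains, PySem.Dict.getD, PySem.Dict.get?, hrest, hk]
    · have hbq : (p.1 == q) = false := by simp [Bool.beq_eq_decide_eq, hk]
      have := ih hnd.2
      have hq' : decide (q = p.1) = false := decide_eq_false (fun h => hk h.symm)
      simp only [PySem.Dict.contains, PySem.Dict.getD, PySem.Dict.get?] at this ⊢
      simp only [List.contains_eq_mem] at this
      simp [hbq, hq', this]

theorem ports_agree (ca : List (String × List (String × List String))) (qs cs : List String)
    (hq : qs.Nodup) (hc : cs.Nodup) (hinner : ∀ p ∈ ca, (p.2.map Prod.fst).Nodup) :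
    calculate_agreement_matrix_py ca qs cs = calculate_agreement_matrix_py_alt ca qs cs := by
  unfold calculate_agreement_matrix_py calculate_agreement_matrix_py_alt
  -- A side
  have hA1 : ∀ q : String,
      (cs.foldl (fun quote_agreements code =>
          quote_agreements.insert code
            (ca.foldl (fun coder_decisions p =>
                coder_decisions ++
                  [if (PySem.Dict.mk p.2).contains q &&
                      ((PySem.Dict.mk p.2).getD q []).contains code then (1 : Int) else 0])
              []))
        (PySem.Dict.empty : PySem.Dict String (List Int)))
      = tabD cs (fun c => ca.map (fun p =>
          if (PySem.Dict.mk p.2).contains q && ((PySem.Dict.mk p.2).getD q []).contains c then (1 : Int) else 0)) := by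
    intro q
    rw [foldl_insert_tabD cs _ hc]
    exact tabD_congr (fun c _ => by rw [PySem.List.foldl_append_singleton_eq_map, List.nil_append])
  have hA2 := foldl_insert_tabD qs (fun q =>
      (tabD cs (fun c => ca.map (fun p =>
        if (PySem.Dict.mk p.2).contains q && ((PySem.Dict.mk p.2).getD q []).contains c then (1 : Int) else 0))).items) hq
  -- B side
  have hB1 : (cs.foldl (fun r c => r.insert c (List.replicate ca.length (0 : Int))) PySem.Dict.empty)
      = tabD cs (fun _ => List.replicate ca.length (0 : Int)) :=
    foldl_insert_tabD cs _ hc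
  have hB2 := foldl_insert_tabD qs
      (fun _ => tabD cs (fun _ => List.replicate ca.length (0 : Int))) hq
  simp only [hA1]
  simp only [hB1]
  rw [hA2, hB2]
  have hScat := scatterFold ca 0 qs cs (fun _ _ => List.replicate ca.length (0 : Int))
  rw [Nat.cast_zero] at hScat
  rw [hScat]
  simp only [tabD, List.map_map]
  refine List.map_congr_left (fun q _ => ?_)
  simp only [Function.comp]
  refine congrArg (fun z => (q, z)) ?_
  refine List.map_congr_left (fun c _ => ?_)
  refine congrArg (fun z => (c, z)) ?_
  have hfc := fillCell_closed ca q c []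
  simp only [List.nil_append, List.length_nil] at hfc
  rw [hfc]
  exact List.map_congr_left (fun p hp => by rw [cell_eq_hit p.2 q c (hinner p hp)])

-- ===== VERDICT (by name: the statement is the Claim_ definition above) =====
theorem calculate_agreement_matrix_py_spec : Claim_equal_calculate_agreement_matrix_py := by
  intro coder_assignments all_quotes all_codes _ hpre
  exact ports_agree coder_assignments all_quotes all_codes hpre.1 hpre.2.1 hpre.2.2
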